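-- pv_equiv track=rewrite | github.com/YallaPapi/pubscrape | podcast_host_scraper/podcast_scraper/contact_extraction.py | classify_contact_type
-- ===== SOURCE A (Python) =====
-- def classify_contact_type(email: str, context: str = "") -> str:
--     """
--     Classify the type of contact based on email and context.
--
--     Args:
--         email: Email address
--         context: Context where email was found
--
--     Returns:
--         Contact type classification
--     """
--     email_lower = email.lower()
--     context_lower = context.lower()
--
--     # Host/personal email indicators
--     if any(indicator in email_lower for indicator in ['host@', 'info@', 'hello@', 'hi@']):
--         return 'host'
--
--     # Business/booking email indicators
--     if any(indicator in email_lower for indicator in ['booking@', 'business@', 'guest@', 'interview@']):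
--         return 'booking'
--
--     # General contact
--     if 'contact@' in email_lower:
--         return 'general'
--
--     # Check context for clues
--     if any(keyword in context_lower for keyword in ['host', 'creator', 'founder']):
--         return 'host'
--     elif any(keyword in context_lower for keyword in ['booking', 'guest', 'interview']):
--         return 'booking'
--
--     return 'unknown'
-- ===== SOURCE B (Python) =====
-- # Collect-then-argmin: scan ALL rules, gather the priority codes of every hit,
-- # and return the label of the smallest priority (instead of a short-circuit cascade).
-- EMAIL_RULES = {'host@': 0, 'info@': 0, 'hello@': 0, 'hi@': 0,
--                'booking@': 1, 'business@': 1, 'guest@': 1, 'interview@': 1,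
--                'contact@': 2}
-- CONTEXT_RULES = {'host': 3, 'creator': 3, 'founder': 3,
--                  'booking': 4, 'guest': 4, 'interview': 4}
-- LABELS = ['host', 'booking', 'general', 'host', 'booking']
--
-- def classify_contact_type(email: str, context: str = "") -> str:
--     el = email.lower()
--     cl = context.lower()
--     hits = [p for ind, p in EMAIL_RULES.items() if ind in el]
--     hits += [p for kw, p in CONTEXT_RULES.items() if kw in cl]
--     return LABELS[min(hits)] if hits else 'unknown'
-- ===== Notes on version B (the rewrite author's own statement) =====
-- stated objective: alternative
-- what changed: Replaced A's short-circuit branch cascade with collect-then-argmin: B scans all rules unconditionally, gathers the priority codes of every hit, and returns the label of the minimum priority (or 'unknown' if none).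
import Mathlib
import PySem

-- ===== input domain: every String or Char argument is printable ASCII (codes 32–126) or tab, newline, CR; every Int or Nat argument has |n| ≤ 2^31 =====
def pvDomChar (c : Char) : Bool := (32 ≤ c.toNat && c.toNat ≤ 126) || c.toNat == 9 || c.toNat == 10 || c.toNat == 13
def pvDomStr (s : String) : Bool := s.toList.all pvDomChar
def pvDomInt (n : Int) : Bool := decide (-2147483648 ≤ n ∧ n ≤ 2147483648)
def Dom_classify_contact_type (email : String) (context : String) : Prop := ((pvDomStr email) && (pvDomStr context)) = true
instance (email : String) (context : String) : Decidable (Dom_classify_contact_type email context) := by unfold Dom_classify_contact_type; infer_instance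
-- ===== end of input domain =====

-- B replaces A's short-circuit branch cascade by collect-then-argmin: gather priority codes of ALL matching rules, return the label of the minimum (objective: alternative).


-- ===== PORT A =====
def classify_contact_type (email : String) (context : String) : String :=
  let email_lower := PySem.Str.lower email
  let context_lower := PySem.Str.lower context
  if ["host@", "info@", "hello@", "hi@"].any (fun ind => PySem.Str.isIn ind email_lower) then "host"
  else if ["booking@", "business@", "guest@", "interview@"].any (fun ind => PySem.Str.isIn ind email_lower) then "booking"
  else if PySem.Str.isIn "contact@" email_lower then "general"
  else if ["host", "creator", "founder"].any (fun k => PySem.Str.isIn k context_lower) then "host"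
  else if ["booking", "guest", "interview"].any (fun k => PySem.Str.isIn k context_lower) then "booking"
  else "unknown"

-- ===== PORT B =====
-- B's module-level rule tables (Python dicts / list, ported as association lists / list).
def pvEmailRules : List (String × Int) :=
  [("host@", 0), ("info@", 0), ("hello@", 0), ("hi@", 0),
   ("booking@", 1), ("business@", 1), ("guest@", 1), ("interview@", 1),
   ("contact@", 2)]
def pvContextRules : List (String × Int) :=
  [("host", 3), ("creator", 3), ("founder", 3),
   ("booking", 4), ("guest", 4), ("interview", 4)]
def pvLabels : List String := ["host", "booking", "general", "host", "booking"]

-- Literal transliteration of B: build the list of priority codes of all hits, take the minimum, index the label table.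
def classify_contact_type_alt (email : String) (context : String) : String :=
  let el := PySem.Str.lower email
  let cl := PySem.Str.lower context
  let hits := (pvEmailRules.filter (fun r => PySem.Str.isIn r.1 el)).map Prod.snd
              ++ (pvContextRules.filter (fun r => PySem.Str.isIn r.1 cl)).map Prod.snd
  match PySem.List.min? hits (fun x => x) with   -- none ↔ hits = [] ('if hits else')
  | some m => (PySem.List.pyGet? pvLabels m).getD "unknown"   -- m ∈ {0..4}, always in range; getD only for totality
  | none => "unknown"

-- ===== PRECONDITION & SPEC =====
def Spec_classify_contact_type (email : String) (context : String) (out : String) : Prop := out = classify_contact_type_alt email context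
instance (email : String) (context : String) (out : String) : Decidable (Spec_classify_contact_type email context out) := by unfold Spec_classify_contact_type; infer_instance

-- ===== CLAIM (what is proved, stated in full; the proofs are below) =====
def Claim_equal_classify_contact_type : Prop := ∀ (email : String) (context : String), Dom_classify_contact_type email context → Spec_classify_contact_type email context (classify_contact_type email context)

-- ===== LEMMAS AND PROOFS =====
-- min(H) = v once v ∈ H and v is a lower bound of H.
theorem pvMinPin (H : List Int) (v : Int) (hmem : v ∈ H) (hlb : ∀ y ∈ H, v ≤ y) :
    PySem.List.min? H (fun x => x) = some v := by
  cases h : PySem.List.min? H (fun x => x) with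
  | none => rw [(PySem.List.min?_eq_none_iff H (fun x => x)).mp h] at hmem; exact absurd hmem (List.not_mem_nil)
  | some m =>
    have h1 : m ∈ H := PySem.List.min?_mem h
    have h2 : m ≤ v := PySem.List.min?_isMin h v hmem
    have h3 : v ≤ m := hlb m h1
    exact congrArg some (le_antisymm h2 h3)

theorem classify_contact_type_spec : Claim_equal_classify_contact_type := by
  intro email context _
  unfold Spec_classify_contact_type classify_contact_type classify_contact_type_alt
  generalize PySem.Str.lower email = el
  generalize PySem.Str.lower context = cl
  simp only [List.any_cons, List.any_nil, Bool.or_false]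
  split_ifs with h1 h2 h3 h4 h5
  · -- email host indicator: min = 0, label "host"
    simp only [Bool.or_eq_true] at h1
    have hmin : PySem.List.min? ((pvEmailRules.filter (fun r => PySem.Str.isIn r.1 el)).map Prod.snd
        ++ (pvContextRules.filter (fun r => PySem.Str.isIn r.1 cl)).map Prod.snd) (fun x => x) = some 0 := by
      apply pvMinPin
      · rcases h1 with h | h | h | h
        all_goals (simp at h; simp [pvEmailRules, pvContextRules, List.mem_filter, h])
      · intro y hy
        simp_all [pvEmailRules, pvContextRules, List.mem_filter]
        omega
    rw [hmin]
    rfl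
  · -- email booking indicator: min = 1
    simp only [Bool.or_eq_true, not_or, Bool.not_eq_true] at h1
    simp only [Bool.or_eq_true] at h2
    obtain ⟨h11, h12, h13, h14⟩ := h1
    have hmin : PySem.List.min? ((pvEmailRules.filter (fun r => PySem.Str.isIn r.1 el)).map Prod.snd
        ++ (pvContextRules.filter (fun r => PySem.Str.isIn r.1 cl)).map Prod.snd) (fun x => x) = some 1 := by
      apply pvMinPin
      · rcases h2 with h | h | h | h
        all_goals (simp at h; simp [pvEmailRules, pvContextRules, List.mem_filter, h])
      · intro y hy
        simp_all [pvEmailRules, pvContextRules, List.mem_filter]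
        omega
    rw [hmin]
    rfl
  · -- contact@: min = 2
    simp only [Bool.or_eq_true, not_or, Bool.not_eq_true] at h1 h2
    obtain ⟨h11, h12, h13, h14⟩ := h1
    obtain ⟨h21, h22, h23, h24⟩ := h2
    have hmin : PySem.List.min? ((pvEmailRules.filter (fun r => PySem.Str.isIn r.1 el)).map Prod.snd
        ++ (pvContextRules.filter (fun r => PySem.Str.isIn r.1 cl)).map Prod.snd) (fun x => x) = some 2 := by
      apply pvMinPin
      · have h := h3
        all_goals (simp at h; simp [pvEmailRules, pvContextRules, List.mem_filter, h])
      · intro y hy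
        simp_all [pvEmailRules, pvContextRules, List.mem_filter]
        omega
    rw [hmin]
    rfl
  · -- context host keyword: min = 3
    simp only [Bool.or_eq_true, not_or, Bool.not_eq_true] at h1 h2 h3
    simp only [Bool.or_eq_true] at h4
    obtain ⟨h11, h12, h13, h14⟩ := h1
    obtain ⟨h21, h22, h23, h24⟩ := h2
    have hmin : PySem.List.min? ((pvEmailRules.filter (fun r => PySem.Str.isIn r.1 el)).map Prod.snd
        ++ (pvContextRules.filter (fun r => PySem.Str.isIn r.1 cl)).map Prod.snd) (fun x => x) = some 3 := by
      apply pvMinPin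
      · rcases h4 with h | h | h
        all_goals (simp at h; simp [pvEmailRules, pvContextRules, List.mem_filter, h])
      · intro y hy
        simp_all [pvEmailRules, pvContextRules, List.mem_filter]
        omega
    rw [hmin]
    rfl
  · -- context booking keyword: min = 4
    simp only [Bool.or_eq_true, not_or, Bool.not_eq_true] at h1 h2 h3 h4
    simp only [Bool.or_eq_true] at h5
    obtain ⟨h11, h12, h13, h14⟩ := h1
    obtain ⟨h21, h22, h23, h24⟩ := h2
    obtain ⟨h41, h42, h43⟩ := h4
    have hmin : PySem.List.min? ((pvEmailRules.filter (fun r => PySem.Str.isIn r.1 el)).map Prod.snd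
        ++ (pvContextRules.filter (fun r => PySem.Str.isIn r.1 cl)).map Prod.snd) (fun x => x) = some 4 := by
      apply pvMinPin
      · rcases h5 with h | h | h
        all_goals (simp at h; simp [pvEmailRules, pvContextRules, List.mem_filter, h])
      · intro y hy
        simp_all [pvEmailRules, pvContextRules, List.mem_filter]
        omega
    rw [hmin]
    rfl
  · -- nothing matches: hits = [], result "unknown"
    simp only [Bool.or_eq_true, not_or, Bool.not_eq_true] at h1 h2 h3 h4 h5
    obtain ⟨h11, h12, h13, h14⟩ := h1
    obtain ⟨h21, h22, h23, h24⟩ := h2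
    obtain ⟨h41, h42, h43⟩ := h4
    obtain ⟨h51, h52, h53⟩ := h5
    have hnil : ((pvEmailRules.filter (fun r => PySem.Str.isIn r.1 el)).map Prod.snd
        ++ (pvContextRules.filter (fun r => PySem.Str.isIn r.1 cl)).map Prod.snd) = [] := by
      simp only [List.append_eq_nil_iff, List.map_eq_nil_iff, List.filter_eq_nil_iff]
      simp_all [pvEmailRules, pvContextRules]
    rw [hnil]
    rfl
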